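-- pv_equiv track=rewrite | github.com/spencerchiang301/Flask-Backend | Utility/MyTiime.py | getMinute
-- ===== SOURCE A (Python) =====
-- def getMinute(number):
--     minute = ""
--     mList1 = ["01", "02", "03", "04", "05", "06", "07", "08", "09", "10",
--               "11", "12", "13", "14", "15", "16", "17", "18", "19", "20",
--               "21", "22", "23", "24", "25", "26", "27", "28", "29", "30",
--               "31", "32", "33", "34", "35", "36", "37", "38", "39", "40",
--               "41", "42", "43", "44", "45", "46", "47", "48", "49", "50",
--               "51", "52", "53", "54", "55", "56", "57", "58", "59"]
--
--     mList2 = ["一分", "二分", "三分", "四分", "五分", "六分", "七分", "八分", "九分", "十分",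
--               "十一分", "十二分", "十三分", "十四分", "十五分", "十六分", "十七分", "十八分", "十九分", "二十分",
--               "二十一分", "二十二分", "二十三分", "二十四分", "二十五分", "二十六分", "二十七分", "二十八分",
--               "二十九分", "三十分", "三十一分", "三十二分", "三十三分", "三十四分", "三十五分", "三十六分",
--               "三十七分", "三十八分", "三十九分", "四十分", "四十一分", "四十二分", "四十三分", "四十四分",
--               "四十五分", "四十六分", "四十七分", "四十八分", "四十九分", "五十分", "五十一分", "五十二分",
--               "五十三分", "五十四分", "五十五分", "五十六分", "五十七分", "五十八分", "五十九分"]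
--
--     for i in range(len(mList1)):
--         if number == mList1[i]:
--             minute = mList2[i]
--             break
--
--     return minute
-- ===== SOURCE B (Python) =====
-- # B: compute the Chinese numeral arithmetically from the two digit characters
-- # instead of scanning parallel 59-element lists.
-- def getMinute(number):
--     ds = "0123456789"
--     units = ["", "\u4e00", "\u4e8c", "\u4e09", "\u56db", "\u4e94",
--              "\u516d", "\u4e03", "\u516b", "\u4e5d"]
--     if len(number) != 2:
--         return ""
--     if number[0] not in ds or number[1] not in ds:
--         return ""
--     t = ds.index(number[0])
--     u = ds.index(number[1])
--     n = 10 * t + u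
--     if n < 1 or n > 59:
--         return ""
--     if t == 0:
--         s = units[u]
--     elif t == 1:
--         s = "\u5341" + units[u]
--     elif u == 0:
--         s = units[t] + "\u5341"
--     else:
--         s = units[t] + "\u5341" + units[u]
--     return s + "\u5206"
-- ===== Notes on version B (the rewrite author's own statement) =====
-- stated objective: idiomatic
-- what changed: Replaces A's linear scan of two parallel 59-element literal lists with arithmetic construction of the Chinese numeral (validate two ASCII digit chars, value 1..59, build tens/units with the 10..19 special case), returning the empty string otherwise.
import Mathlib
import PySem

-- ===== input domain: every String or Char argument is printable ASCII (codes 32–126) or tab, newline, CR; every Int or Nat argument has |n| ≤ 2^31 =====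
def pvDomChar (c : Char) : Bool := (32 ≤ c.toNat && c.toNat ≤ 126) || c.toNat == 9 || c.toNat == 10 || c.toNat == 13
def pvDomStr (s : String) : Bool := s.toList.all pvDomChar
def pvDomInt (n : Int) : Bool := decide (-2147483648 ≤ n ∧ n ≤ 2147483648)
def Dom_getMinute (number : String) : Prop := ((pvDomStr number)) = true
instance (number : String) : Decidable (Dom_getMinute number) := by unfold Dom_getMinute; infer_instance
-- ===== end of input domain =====

-- ===== PORT A =====
-- B replaces A's scan of two parallel 59-element lists by computing the
-- Chinese numeral arithmetically from the two digit characters (idiomatic).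
def mList1 : List String := ["01", "02", "03", "04", "05", "06", "07", "08", "09", "10", "11", "12", "13", "14", "15", "16", "17", "18", "19", "20", "21", "22", "23", "24", "25", "26", "27", "28", "29", "30", "31", "32", "33", "34", "35", "36", "37", "38", "39", "40", "41", "42", "43", "44", "45", "46", "47", "48", "49", "50", "51", "52", "53", "54", "55", "56", "57", "58", "59"]

def mList2 : List String := ["一分", "二分", "三分", "四分", "五分", "六分", "七分", "八分", "九分", "十分", "十一分", "十二分", "十三分", "十四分", "十五分", "十六分", "十七分", "十八分", "十九分", "二十分", "二十一分", "二十二分", "二十三分", "二十四分", "二十五分", "二十六分", "二十七分", "二十八分", "二十九分", "三十分", "三十一分", "三十二分", "三十三分", "三十四分", "三十五分", "三十六分", "三十七分", "三十八分", "三十九分", "四十分", "四十一分", "四十二分", "四十三分", "四十四分", "四十五分", "四十六分", "四十七分", "四十八分", "四十九分", "五十分", "五十一分", "五十二分", "五十三分", "五十四分", "五十五分", "五十六分", "五十七分", "五十八分", "五十九分"]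

-- the `for i in range(...): if number == mList1[i]: minute = mList2[i]; break` loop
def getMinuteLoop (number : String) : List Nat → String
  | [] => ""
  | i :: rest =>
    if number == mList1.getD i "" then mList2.getD i ""
    else getMinuteLoop number rest

def getMinute (number : String) : String :=
  getMinuteLoop number (List.range mList1.length)

-- ===== PORT B =====
def bDigits : List Char := ['0', '1', '2', '3', '4', '5', '6', '7', '8', '9']

def bUnits : List String := ["", "一", "二", "三", "四", "五", "六", "七", "八", "九"]

def getMinute_alt (number : String) : String :=
  match number.toList with
  | [c0, c1] =>
    if c0 ∉ bDigits ∨ c1 ∉ bDigits then ""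
    else
      let t := bDigits.idxOf c0
      let u := bDigits.idxOf c1
      let n := 10 * t + u
      if n < 1 ∨ n > 59 then ""
      else
        let s :=
          if t = 0 then bUnits.getD u ""
          else if t = 1 then "十" ++ bUnits.getD u ""
          else if u = 0 then bUnits.getD t "" ++ "十"
          else bUnits.getD t "" ++ "十" ++ bUnits.getD u ""
        s ++ "分"
  | _ => ""

-- ===== PRECONDITION & SPEC =====
def Spec_getMinute (number : String) (out : String) : Prop := out = getMinute_alt number
instance (number : String) (out : String) : Decidable (Spec_getMinute number out) := by unfold Spec_getMinute; infer_instance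

-- ===== CLAIM (what is proved, stated in full; the proofs are below) =====
def Claim_equal_getMinute : Prop := ∀ (number : String), Dom_getMinute number → Spec_getMinute number (getMinute number)

-- ===== LEMMAS AND PROOFS =====

-- A's loop returns "" once number matches no element of mList1
theorem loop_not_mem (number : String) (h : number ∉ mList1) :
    ∀ is : List Nat, (∀ i ∈ is, i < mList1.length) → getMinuteLoop number is = "" := by
  intro is
  induction is with
  | nil => intro _; rfl
  | cons i rest ih =>
    intro hb
    have hi : i < mList1.length := hb i (List.mem_cons_self)
    have hmem : mList1.getD i "" ∈ mList1 := by
      rw [List.getD_eq_getElem _ _ hi]; exact List.getElem_mem hi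
    have hne : (number == mList1.getD i "") = false := by
      rw [beq_eq_false_iff_ne]; intro e; exact h (e ▸ hmem)
    rw [getMinuteLoop, hne, if_neg (by simp)]
    exact ih (fun j hj => hb j (List.mem_cons_of_mem _ hj))

-- B also returns "" when number matches no element of mList1
theorem alt_not_mem (number : String) (h : number ∉ mList1) : getMinute_alt number = "" := by
  rcases hl : number.toList with _ | ⟨c0, _ | ⟨c1, _ | ⟨c2, t⟩⟩⟩
  · simp [getMinute_alt, hl]
  · simp [getMinute_alt, hl]
  · by_cases h0 : c0 ∈ bDigits
    · by_cases h1 : c1 ∈ bDigits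
      · rw [← @String.ofList_toList number] at h ⊢
        rw [hl] at h ⊢
        fin_cases h0 <;> fin_cases h1 <;> revert h <;> decide
      · simp [getMinute_alt, hl, h1]
    · simp [getMinute_alt, hl, h0]
  · simp [getMinute_alt, hl]

theorem main_eq (number : String) : getMinute number = getMinute_alt number := by
  by_cases hm : number ∈ mList1
  · fin_cases hm <;> decide
  · rw [alt_not_mem number hm]
    exact loop_not_mem number hm (List.range mList1.length)
      (fun i hi => List.mem_range.mp hi)


-- ===== VERDICT (by name: the statement is the Claim_ definition above) =====
theorem getMinute_spec : Claim_equal_getMinute := by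
  intro number _
  unfold Spec_getMinute
  exact main_eq number
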